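-- pv_equiv track=rewrite | github.com/wyk18703232953/myResearch | codeComplex/data copy/filteredData/python/np/python_np_0352.py | core_logic
-- ===== SOURCE A (Python) =====
-- from itertools import combinations
--
-- MOD = 1000000007
--
-- def findsum(comb):
--     s = 0
--     for song in comb:
--         s += song[0]
--     return s
--
-- def finda(a, b, c, memo):
--     key = (a, b, c, 'a')
--     if key in memo:
--         return memo[key]
--     if a == 0:
--         memo[key] = 0
--         return 0
--     if a == 1 and b == 0 and c == 0:
--         memo[key] = 1
--         return 1
--     res = (a * findb(a - 1, b, c, memo) + a * findc(a - 1, b, c, memo)) % MOD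
--     memo[key] = res
--     return res
--
-- def findb(a, b, c, memo):
--     key = (a, b, c, 'b')
--     if key in memo:
--         return memo[key]
--     if b == 0:
--         memo[key] = 0
--         return 0
--     if b == 1 and a == 0 and c == 0:
--         memo[key] = 1
--         return 1
--     res = (b * finda(a, b - 1, c, memo) + b * findc(a, b - 1, c, memo)) % MOD
--     memo[key] = res
--     return res
--
-- def findc(a, b, c, memo):
--     key = (a, b, c, 'c')
--     if key in memo:
--         return memo[key]
--     if c == 0:
--         memo[key] = 0
--         return 0
--     if c == 1 and a == 0 and b == 0:
--         memo[key] = 1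
--         return 1
--     res = (c * finda(a, b, c - 1, memo) + c * findb(a, b, c - 1, memo)) % MOD
--     memo[key] = res
--     return res
--
-- def core_logic(n, T, songs):
--     total_combinations = 0
--     memo = {}
--     for i in range(1, n + 1):
--         allcomb = combinations(songs, i)
--         for comb in allcomb:
--             s = findsum(comb)
--             if s == T:
--                 a = 0
--                 b = 0
--                 c = 0
--                 for song in comb:
--                     if song[1] == 1:
--                         a += 1
--                     elif song[1] == 2:
--                         b += 1
--                     else:
--                         c += 1
--                 total_combinations += (
--                     finda(a, b, c, memo)
--                     + findb(a, b, c, memo)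
--                     + findc(a, b, c, memo)
--                 )
--                 total_combinations %= MOD
--     return total_combinations % MOD
-- ===== SOURCE B (Python) =====
-- MOD = 1000000007
--
-- def core_logic(n, T, songs):
--     # count songs of each genre
--     na = sum(1 for s in songs if s[1] == 1)
--     nb = sum(1 for s in songs if s[1] == 2)
--     nc = len(songs) - na - nb
--     # bottom-up table: w[(i,j,k)] = (#arrangements ending in genre a, in b, in c)
--     w = {}
--     for i in range(na + 1):
--         for j in range(nb + 1):
--             for k in range(nc + 1):
--                 if i == 0:
--                     fa = 0
--                 elif i == 1 and j == 0 and k == 0: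
--                     fa = 1
--                 else:
--                     p = w[(i - 1, j, k)]
--                     fa = i * (p[1] + p[2]) % MOD
--                 if j == 0:
--                     fb = 0
--                 elif j == 1 and i == 0 and k == 0:
--                     fb = 1
--                 else:
--                     p = w[(i, j - 1, k)]
--                     fb = j * (p[0] + p[2]) % MOD
--                 if k == 0:
--                     fc = 0
--                 elif k == 1 and i == 0 and j == 0:
--                     fc = 1
--                 else:
--                     p = w[(i, j, k - 1)]
--                     fc = k * (p[0] + p[1]) % MOD
--                 w[(i, j, k)] = (fa, fb, fc)
--     # subset DP: dp[(a,b,c,s)] = number of subsets with those genre counts and duration sum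
--     dp = {}
--     for song in songs:
--         d0 = song[0]
--         g = song[1]
--         da, db, dc = (1, 0, 0) if g == 1 else ((0, 1, 0) if g == 2 else (0, 0, 1))
--         for key, cnt in list(dp.items()):
--             nk = (key[0] + da, key[1] + db, key[2] + dc, key[3] + d0)
--             dp[nk] = dp.get(nk, 0) + cnt
--         sk = (da, db, dc, d0)
--         dp[sk] = dp.get(sk, 0) + 1
--     total = 0
--     for key, cnt in dp.items():
--         a, b, c, s = key
--         if s == T and 1 <= a + b + c <= n:
--             fa, fb, fc = w[(a, b, c)]
--             total = (total + cnt * (fa + fb + fc)) % MOD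
--     return total % MOD
-- ===== Notes on version B (the rewrite author's own statement) =====
-- stated objective: alternative
-- what changed: A enumerates every subset of every size with itertools.combinations and counts arrangements by a memoized top-down mutual recursion; B never enumerates subsets: it runs a subset DP over the songs keyed by (genre counts, duration sum), precomputes the arrangement numbers in a bottom-up table, and sums count*arrangements over the DP dictionary.
-- outside the precondition, e.g. on core_logic(1, 3, [[5]]): A returns 0, B raises IndexError
import Mathlib
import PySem

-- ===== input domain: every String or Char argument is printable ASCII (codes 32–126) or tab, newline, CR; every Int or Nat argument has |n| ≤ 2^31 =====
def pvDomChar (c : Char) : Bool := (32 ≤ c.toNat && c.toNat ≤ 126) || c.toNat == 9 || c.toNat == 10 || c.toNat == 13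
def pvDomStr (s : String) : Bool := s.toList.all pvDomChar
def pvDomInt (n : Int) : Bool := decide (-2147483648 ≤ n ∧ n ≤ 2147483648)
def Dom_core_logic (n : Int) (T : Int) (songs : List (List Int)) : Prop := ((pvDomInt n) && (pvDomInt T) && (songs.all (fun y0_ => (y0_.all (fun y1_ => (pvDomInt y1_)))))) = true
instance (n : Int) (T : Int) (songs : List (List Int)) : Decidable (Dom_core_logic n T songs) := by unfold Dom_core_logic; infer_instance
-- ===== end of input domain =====

-- B replaces A's per-size subset enumeration (itertools.combinations plus a memoized
-- top-down arrangement recursion) by a subset DP over the songs keyed by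
-- (genre counts, duration sum) plus a bottom-up arrangement table (objective: alternative).

-- ===== PORT A =====
def pvMOD : Int := 1000000007

-- findsum: s += song[0]  (song[0] exists under Pre_; the getD default is never read there)
def findsumA (comb : List (List Int)) : Int :=
  comb.foldl (fun s song => s + PySem.List.pyGetD song 0 0) 0

-- memoized mutual recursion finda/findb/findc; the Nat argument is pure fuel
-- (call sites pass fuel > a+b+c, so the fuel-exhausted branch is unreachable)
mutual
def findaA : Nat → Int → Int → Int → PySem.Dict (Int × Int × Int × String) Int →
    Int × PySem.Dict (Int × Int × Int × String) Int
  | 0, _, _, _, m => (0, m)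
  | fuel+1, a, b, c, m =>
    match m.get? (a, b, c, "a") with
    | some v => (v, m)
    | none =>
      if a = 0 then (0, m.insert (a, b, c, "a") 0)
      else if a = 1 ∧ b = 0 ∧ c = 0 then (1, m.insert (a, b, c, "a") 1)
      else
        let rb := findbA fuel (a - 1) b c m
        let rc := findcA fuel (a - 1) b c rb.2
        let res := PySem.Int.mod (a * rb.1 + a * rc.1) pvMOD
        (res, rc.2.insert (a, b, c, "a") res)
def findbA : Nat → Int → Int → Int → PySem.Dict (Int × Int × Int × String) Int →
    Int × PySem.Dict (Int × Int × Int × String) Int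
  | 0, _, _, _, m => (0, m)
  | fuel+1, a, b, c, m =>
    match m.get? (a, b, c, "b") with
    | some v => (v, m)
    | none =>
      if b = 0 then (0, m.insert (a, b, c, "b") 0)
      else if b = 1 ∧ a = 0 ∧ c = 0 then (1, m.insert (a, b, c, "b") 1)
      else
        let ra := findaA fuel a (b - 1) c m
        let rc := findcA fuel a (b - 1) c ra.2
        let res := PySem.Int.mod (b * ra.1 + b * rc.1) pvMOD
        (res, rc.2.insert (a, b, c, "b") res)
def findcA : Nat → Int → Int → Int → PySem.Dict (Int × Int × Int × String) Int →
    Int × PySem.Dict (Int × Int × Int × String) Int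
  | 0, _, _, _, m => (0, m)
  | fuel+1, a, b, c, m =>
    match m.get? (a, b, c, "c") with
    | some v => (v, m)
    | none =>
      if c = 0 then (0, m.insert (a, b, c, "c") 0)
      else if c = 1 ∧ a = 0 ∧ b = 0 then (1, m.insert (a, b, c, "c") 1)
      else
        let ra := findaA fuel a b (c - 1) m
        let rb := findbA fuel a b (c - 1) ra.2
        let res := PySem.Int.mod (c * ra.1 + c * rb.1) pvMOD
        (res, rb.2.insert (a, b, c, "c") res)
end

-- itertools.combinations(l, r), ported by hand: lexicographic by position (exact)
def combsA : List (List Int) → Nat → List (List (List Int))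
  | _, 0 => [[]]
  | [], _+1 => []
  | x :: xs, r+1 => ((combsA xs r).map (fun cmb => x :: cmb)) ++ combsA xs (r+1)
  termination_by l _ => l.length

-- the genre-counting loop over a combination (song[1] exists under Pre_)
def countGenres (comb : List (List Int)) : Int × Int × Int :=
  comb.foldl (fun abc song =>
      let g := PySem.List.pyGetD song 1 0
      if g = 1 then (abc.1 + 1, abc.2.1, abc.2.2)
      else if g = 2 then (abc.1, abc.2.1 + 1, abc.2.2)
      else (abc.1, abc.2.1, abc.2.2 + 1)) (0, 0, 0)

-- body of the inner 'for comb in allcomb' loop, state = (total, memo)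
def combStep (T : Int) (tm : Int × PySem.Dict (Int × Int × Int × String) Int)
    (comb : List (List Int)) : Int × PySem.Dict (Int × Int × Int × String) Int :=
  let s := findsumA comb
  if s = T then
    let abc := countGenres comb
    let fuel := (abc.1 + abc.2.1 + abc.2.2).toNat + 1
    let ra := findaA fuel abc.1 abc.2.1 abc.2.2 tm.2
    let rb := findbA fuel abc.1 abc.2.1 abc.2.2 ra.2
    let rc := findcA fuel abc.1 abc.2.1 abc.2.2 rb.2
    (PySem.Int.mod (tm.1 + (ra.1 + rb.1 + rc.1)) pvMOD, rc.2)
  else tm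

-- 'for i in range(1, n+1)' as a lazy countdown (fuel = number of remaining iterations)
def outerA (T : Int) (songs : List (List Int)) :
    Nat → Int → Int × PySem.Dict (Int × Int × Int × String) Int →
    Int × PySem.Dict (Int × Int × Int × String) Int
  | 0, _, tm => tm
  | fuel+1, i, tm => outerA T songs fuel (i + 1) ((combsA songs i.toNat).foldl (combStep T) tm)

def core_logic (n : Int) (T : Int) (songs : List (List Int)) : Int :=
  PySem.Int.mod (outerA T songs n.toNat 1 (0, PySem.Dict.empty)).1 pvMOD

-- ===== PORT B =====
-- one cell of the bottom-up arrangement table (the getD defaults are never read: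
-- every cell consulted was filled by an earlier iteration)
def wCell (w : PySem.Dict (Int × Int × Int) (Int × Int × Int)) (i j k : Int) :
    Int × Int × Int :=
  let fa := if i = 0 then 0
            else if i = 1 ∧ j = 0 ∧ k = 0 then 1
            else
              let p := w.getD (i - 1, j, k) (0, 0, 0)
              PySem.Int.mod (i * (p.2.1 + p.2.2)) pvMOD
  let fb := if j = 0 then 0
            else if j = 1 ∧ i = 0 ∧ k = 0 then 1
            else
              let p := w.getD (i, j - 1, k) (0, 0, 0)
              PySem.Int.mod (j * (p.1 + p.2.2)) pvMOD
  let fc := if k = 0 then 0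
            else if k = 1 ∧ i = 0 ∧ j = 0 then 1
            else
              let p := w.getD (i, j, k - 1) (0, 0, 0)
              PySem.Int.mod (k * (p.1 + p.2.1)) pvMOD
  (fa, fb, fc)

def buildW (ga gb gc : Int) : PySem.Dict (Int × Int × Int) (Int × Int × Int) :=
  (PySem.List.pyRange 0 (ga + 1) 1).foldl (fun w i =>
    (PySem.List.pyRange 0 (gb + 1) 1).foldl (fun w j =>
      (PySem.List.pyRange 0 (gc + 1) 1).foldl (fun w k =>
        w.insert (i, j, k) (wCell w i j k)) w) w) PySem.Dict.empty

-- one song of the subset DP (iterates over a snapshot of dp.items(), as the Python does)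
def dpStep (dp : PySem.Dict (Int × Int × Int × Int) Int) (song : List Int) :
    PySem.Dict (Int × Int × Int × Int) Int :=
  let d0 := PySem.List.pyGetD song 0 0
  let g := PySem.List.pyGetD song 1 0
  let de : Int × Int × Int := if g = 1 then (1, 0, 0) else if g = 2 then (0, 1, 0) else (0, 0, 1)
  let dp1 := dp.items.foldl (fun d kv =>
      let nk := (kv.1.1 + de.1, kv.1.2.1 + de.2.1, kv.1.2.2.1 + de.2.2, kv.1.2.2.2 + d0)
      d.insert nk (d.getD nk 0 + kv.2)) dp
  let sk := (de.1, de.2.1, de.2.2, d0)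
  dp1.insert sk (dp1.getD sk 0 + 1)

-- the final summation loop over dp.items()
def totFold (n T : Int) (w : PySem.Dict (Int × Int × Int) (Int × Int × Int))
    (dp : PySem.Dict (Int × Int × Int × Int) Int) : Int :=
  dp.items.foldl (fun t kv =>
      if kv.1.2.2.2 = T ∧ 1 ≤ kv.1.1 + kv.1.2.1 + kv.1.2.2.1 ∧ kv.1.1 + kv.1.2.1 + kv.1.2.2.1 ≤ n then
        let p := w.getD (kv.1.1, kv.1.2.1, kv.1.2.2.1) (0, 0, 0)
        PySem.Int.mod (t + kv.2 * (p.1 + p.2.1 + p.2.2)) pvMOD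
      else t) 0

def core_logic_alt (n : Int) (T : Int) (songs : List (List Int)) : Int :=
  let ga : Int := (songs.countP (fun s => PySem.List.pyGetD s 1 0 == 1) : Nat)
  let gb : Int := (songs.countP (fun s => PySem.List.pyGetD s 1 0 == 2) : Nat)
  let gc : Int := (songs.length : Int) - ga - gb
  PySem.Int.mod (totFold n T (buildW ga gb gc) (songs.foldl dpStep PySem.Dict.empty)) pvMOD

-- ===== PRECONDITION & SPEC =====
-- Pre_ excludes song entries of length < 2: there A raises IndexError whenever a subset
-- summing to T contains such an entry (and B always does).
def Pre_core_logic (n : Int) (T : Int) (songs : List (List Int)) : Prop :=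
  ∀ song ∈ songs, 2 ≤ song.length
instance (n : Int) (T : Int) (songs : List (List Int)) : Decidable (Pre_core_logic n T songs) := by
  unfold Pre_core_logic; infer_instance

def pvWitness_core_logic : Int × Int × List (List Int) := (2, 5, [[3, 1], [2, 2]])

def Spec_core_logic (n : Int) (T : Int) (songs : List (List Int)) (out : Int) : Prop := out = core_logic_alt n T songs
instance (n : Int) (T : Int) (songs : List (List Int)) (out : Int) : Decidable (Spec_core_logic n T songs out) := by unfold Spec_core_logic; infer_instance

-- ===== CLAIM (what is proved, stated in full; the proofs are below) =====
def Claim_equal_core_logic : Prop := ∀ (n : Int) (T : Int) (songs : List (List Int)), Dom_core_logic n T songs → Pre_core_logic n T songs → Spec_core_logic n T songs (core_logic n T songs)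

-- ===== LEMMAS AND PROOFS =====


-- ===================== proof-side definitions =====================

-- pure (memo-free) values of the arrangement recursion; the Nat is fuel
mutual
def vA : Nat → Int → Int → Int → Int
  | 0, _, _, _ => 0
  | f+1, a, b, c =>
    if a = 0 then 0
    else if a = 1 ∧ b = 0 ∧ c = 0 then 1
    else PySem.Int.mod (a * vB f (a - 1) b c + a * vC f (a - 1) b c) pvMOD
def vB : Nat → Int → Int → Int → Int
  | 0, _, _, _ => 0
  | f+1, a, b, c =>
    if b = 0 then 0
    else if b = 1 ∧ a = 0 ∧ c = 0 then 1
    else PySem.Int.mod (b * vA f a (b - 1) c + b * vC f a (b - 1) c) pvMOD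
def vC : Nat → Int → Int → Int → Int
  | 0, _, _, _ => 0
  | f+1, a, b, c =>
    if c = 0 then 0
    else if c = 1 ∧ a = 0 ∧ b = 0 then 1
    else PySem.Int.mod (c * vA f a b (c - 1) + c * vB f a b (c - 1)) pvMOD
end

def faV (a b c : Int) : Int := vA ((a + b + c).toNat + 1) a b c
def fbV (a b c : Int) : Int := vB ((a + b + c).toNat + 1) a b c
def fcV (a b c : Int) : Int := vC ((a + b + c).toNat + 1) a b c

def pureOf : Int × Int × Int × String → Int
  | (a, b, c, t) => if t = "a" then faV a b c else if t = "b" then fbV a b c else fcV a b c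

def GoodM (m : PySem.Dict (Int × Int × Int × String) Int) : Prop :=
  ∀ k v, m.get? k = some v → v = pureOf k

def gcode (s : List Int) : Int := PySem.List.pyGetD s 1 0
def dvalue (s : List Int) : Int := PySem.List.pyGetD s 0 0
def cntA (l : List (List Int)) : Int := (l.countP (fun s => gcode s == 1) : Nat)
def cntB (l : List (List Int)) : Int := (l.countP (fun s => gcode s == 2) : Nat)
def cntC (l : List (List Int)) : Int := (l.countP (fun s => !(gcode s == 1) && !(gcode s == 2)) : Nat)
def dsum (l : List (List Int)) : Int := (l.map dvalue).sum
def sigOf (l : List (List Int)) : Int × Int × Int × Int := (cntA l, cntB l, cntC l, dsum l)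

def dA (x : List Int) : Int := if gcode x = 1 then 1 else 0
def dB (x : List Int) : Int := if gcode x = 2 then 1 else 0
def dC (x : List Int) : Int := if gcode x ≠ 1 ∧ gcode x ≠ 2 then 1 else 0
def shiftK (x : List Int) (k : Int × Int × Int × Int) : Int × Int × Int × Int :=
  (k.1 + dA x, k.2.1 + dB x, k.2.2.1 + dC x, k.2.2.2 + dvalue x)

def NEsubs : List (List Int) → List (List (List Int))
  | [] => []
  | x :: xs => NEsubs xs ++ (NEsubs xs).map (fun s => x :: s) ++ [[x]]

def SN (l : List (List Int)) (g : List (List Int) → Int) : Int := ((NEsubs l).map g).sum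

def Fv (T : Int) (sub : List (List Int)) : Int :=
  if dsum sub = T then faV (cntA sub) (cntB sub) (cntC sub) + fbV (cntA sub) (cntB sub) (cntC sub) + fcV (cntA sub) (cntB sub) (cntC sub) else 0

def SD (g : Int × Int × Int × Int → Int) (d : PySem.Dict (Int × Int × Int × Int) Int) : Int :=
  (d.items.map (fun kv => g kv.1 * kv.2)).sum

def Cc : List (List Int) → (Int × Int × Int × Int → Int) → PySem.Dict (Int × Int × Int × Int) Int → Int
  | [], g, d => SD g d
  | x :: l, g, d => Cc l g d + Cc l (fun k => g (shiftK x k)) d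

def wV (i j k : Int) : Int × Int × Int := (faV i j k, fbV i j k, fcV i j k)

-- ===================== basic arithmetic facts =====================

lemma pvMOD_pos : (0:Int) < pvMOD := by norm_num [pvMOD]

lemma pmod (x : Int) : PySem.Int.mod x pvMOD = x % pvMOD :=
  PySem.Int.mod_eq_emod_of_pos pvMOD_pos

-- ===================== fuel irrelevance and value characterisation =====================

lemma v_fuel : ∀ f1 f2 a b c, 0 ≤ a → 0 ≤ b → 0 ≤ c →
    (a + b + c).toNat < f1 → (a + b + c).toNat < f2 →
    (vA f1 a b c = vA f2 a b c ∧ vB f1 a b c = vB f2 a b c ∧ vC f1 a b c = vC f2 a b c) := by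
  intro f1
  induction f1 with
  | zero => intro f2 a b c ha hb hc h1 h2; omega
  | succ f ih =>
    intro f2 a b c ha hb hc h1 h2
    cases f2 with
    | zero => omega
    | succ f2' =>
      refine ⟨?_, ?_, ?_⟩
      · simp only [vA]
        by_cases h0 : a = 0
        · simp [h0]
        · by_cases hbase : a = 1 ∧ b = 0 ∧ c = 0
          · simp [h0, hbase]
          · have h := ih f2' (a - 1) b c (by omega) hb hc (by omega) (by omega)
            simp only [if_neg h0, if_neg hbase, h.2.1, h.2.2]
      · simp only [vB]
        by_cases h0 : b = 0
        · simp [h0]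
        · by_cases hbase : b = 1 ∧ a = 0 ∧ c = 0
          · simp [h0, hbase]
          · have h := ih f2' a (b - 1) c ha (by omega) hc (by omega) (by omega)
            simp only [if_neg h0, if_neg hbase, h.1, h.2.2]
      · simp only [vC]
        by_cases h0 : c = 0
        · simp [h0]
        · by_cases hbase : c = 1 ∧ a = 0 ∧ b = 0
          · simp [h0, hbase]
          · have h := ih f2' a b (c - 1) ha hb (by omega) (by omega) (by omega)
            simp only [if_neg h0, if_neg hbase, h.1, h.2.1]

lemma faV_eq (a b c : Int) (ha : 0 ≤ a) (hb : 0 ≤ b) (hc : 0 ≤ c) :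
    faV a b c = if a = 0 then 0 else if a = 1 ∧ b = 0 ∧ c = 0 then 1
      else PySem.Int.mod (a * fbV (a - 1) b c + a * fcV (a - 1) b c) pvMOD := by
  unfold faV
  simp only [vA]
  by_cases h0 : a = 0
  · simp [h0]
  · by_cases hbase : a = 1 ∧ b = 0 ∧ c = 0
    · simp [h0, hbase]
    · have h := v_fuel ((a + b + c).toNat) (((a - 1) + b + c).toNat + 1) (a - 1) b c
        (by omega) hb hc (by omega) (by omega)
      simp only [if_neg h0, if_neg hbase, h.2.1, h.2.2, fbV, fcV]

lemma fbV_eq (a b c : Int) (ha : 0 ≤ a) (hb : 0 ≤ b) (hc : 0 ≤ c) :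
    fbV a b c = if b = 0 then 0 else if b = 1 ∧ a = 0 ∧ c = 0 then 1
      else PySem.Int.mod (b * faV a (b - 1) c + b * fcV a (b - 1) c) pvMOD := by
  unfold fbV
  simp only [vB]
  by_cases h0 : b = 0
  · simp [h0]
  · by_cases hbase : b = 1 ∧ a = 0 ∧ c = 0
    · simp [h0, hbase]
    · have h := v_fuel ((a + b + c).toNat) ((a + (b - 1) + c).toNat + 1) a (b - 1) c
        ha (by omega) hc (by omega) (by omega)
      simp only [if_neg h0, if_neg hbase, h.1, h.2.2, faV, fcV]

lemma fcV_eq (a b c : Int) (ha : 0 ≤ a) (hb : 0 ≤ b) (hc : 0 ≤ c) :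
    fcV a b c = if c = 0 then 0 else if c = 1 ∧ a = 0 ∧ b = 0 then 1
      else PySem.Int.mod (c * faV a b (c - 1) + c * fbV a b (c - 1)) pvMOD := by
  unfold fcV
  simp only [vC]
  by_cases h0 : c = 0
  · simp [h0]
  · by_cases hbase : c = 1 ∧ a = 0 ∧ b = 0
    · simp [h0, hbase]
    · have h := v_fuel ((a + b + c).toNat) ((a + b + (c - 1)).toNat + 1) a b (c - 1)
        ha hb (by omega) (by omega) (by omega)
      simp only [if_neg h0, if_neg hbase, h.1, h.2.1, faV, fbV]

-- ===================== memo soundness =====================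

lemma GoodM_insert {m : PySem.Dict (Int × Int × Int × String) Int} (hm : GoodM m)
    (k : Int × Int × Int × String) (v : Int) (hv : v = pureOf k) : GoodM (m.insert k v) := by
  intro k' v' h'
  rcases eq_or_ne k' k with rfl | hne
  · rw [PySem.Dict.get?_insert_self] at h'
    injection h' with h''
    rw [← h'']; exact hv
  · rw [PySem.Dict.get?_insert_of_ne _ _ hne] at h'
    exact hm _ _ h'

lemma memo_sound : ∀ f a b c (m : PySem.Dict (Int × Int × Int × String) Int),
    0 ≤ a → 0 ≤ b → 0 ≤ c → (a + b + c).toNat < f → GoodM m →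
    (((findaA f a b c m).1 = faV a b c ∧ GoodM (findaA f a b c m).2) ∧
     ((findbA f a b c m).1 = fbV a b c ∧ GoodM (findbA f a b c m).2) ∧
     ((findcA f a b c m).1 = fcV a b c ∧ GoodM (findcA f a b c m).2)) := by
  intro f
  induction f with
  | zero => intro a b c m ha hb hc hf hm; omega
  | succ f ih =>
    intro a b c m ha hb hc hf hm
    refine ⟨?_, ?_, ?_⟩
    · rcases hg : m.get? (a, b, c, "a") with _ | v
      · simp only [findaA, hg]
        by_cases h0 : a = 0
        · simp only [if_pos h0]
          refine ⟨by rw [faV_eq a b c ha hb hc, if_pos h0], ?_⟩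
          exact GoodM_insert hm _ _ (by simp [pureOf]; rw [faV_eq a b c ha hb hc, if_pos h0])
        · by_cases hbase : a = 1 ∧ b = 0 ∧ c = 0
          · simp only [if_neg h0, if_pos hbase]
            refine ⟨by rw [faV_eq a b c ha hb hc, if_neg h0, if_pos hbase], ?_⟩
            exact GoodM_insert hm _ _ (by simp [pureOf]; rw [faV_eq a b c ha hb hc, if_neg h0, if_pos hbase])
          · simp only [if_neg h0, if_neg hbase]
            obtain ⟨hbval, hbmemo⟩ := (ih (a - 1) b c m (by omega) hb hc (by omega) hm).2.1
            obtain ⟨hcval, hcmemo⟩ := (ih (a - 1) b c (findbA f (a - 1) b c m).2 (by omega) hb hc (by omega) hbmemo).2.2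
            have hval : PySem.Int.mod (a * (findbA f (a - 1) b c m).1 + a * (findcA f (a - 1) b c (findbA f (a - 1) b c m).2).1) pvMOD = faV a b c := by
              rw [hbval, hcval, faV_eq a b c ha hb hc, if_neg h0, if_neg hbase]
            exact ⟨hval, GoodM_insert hcmemo _ _ (by simp [pureOf]; rw [← hval])⟩
      · simp only [findaA, hg]
        exact ⟨by have := hm _ _ hg; rw [this]; simp [pureOf], hm⟩
    · rcases hg : m.get? (a, b, c, "b") with _ | v
      · simp only [findbA, hg]
        by_cases h0 : b = 0
        · simp only [if_pos h0]
          refine ⟨by rw [fbV_eq a b c ha hb hc, if_pos h0], ?_⟩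
          exact GoodM_insert hm _ _ (by simp [pureOf]; rw [fbV_eq a b c ha hb hc, if_pos h0])
        · by_cases hbase : b = 1 ∧ a = 0 ∧ c = 0
          · simp only [if_neg h0, if_pos hbase]
            refine ⟨by rw [fbV_eq a b c ha hb hc, if_neg h0, if_pos hbase], ?_⟩
            exact GoodM_insert hm _ _ (by simp [pureOf]; rw [fbV_eq a b c ha hb hc, if_neg h0, if_pos hbase])
          · simp only [if_neg h0, if_neg hbase]
            obtain ⟨haval, hamemo⟩ := (ih a (b - 1) c m ha (by omega) hc (by omega) hm).1
            obtain ⟨hcval, hcmemo⟩ := (ih a (b - 1) c (findaA f a (b - 1) c m).2 ha (by omega) hc (by omega) hamemo).2.2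
            have hval : PySem.Int.mod (b * (findaA f a (b - 1) c m).1 + b * (findcA f a (b - 1) c (findaA f a (b - 1) c m).2).1) pvMOD = fbV a b c := by
              rw [haval, hcval, fbV_eq a b c ha hb hc, if_neg h0, if_neg hbase]
            exact ⟨hval, GoodM_insert hcmemo _ _ (by simp [pureOf]; rw [← hval])⟩
      · simp only [findbA, hg]
        exact ⟨by have := hm _ _ hg; rw [this]; simp [pureOf], hm⟩
    · rcases hg : m.get? (a, b, c, "c") with _ | v
      · simp only [findcA, hg]
        by_cases h0 : c = 0
        · simp only [if_pos h0]
          refine ⟨by rw [fcV_eq a b c ha hb hc, if_pos h0], ?_⟩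
          exact GoodM_insert hm _ _ (by simp [pureOf]; rw [fcV_eq a b c ha hb hc, if_pos h0])
        · by_cases hbase : c = 1 ∧ a = 0 ∧ b = 0
          · simp only [if_neg h0, if_pos hbase]
            refine ⟨by rw [fcV_eq a b c ha hb hc, if_neg h0, if_pos hbase], ?_⟩
            exact GoodM_insert hm _ _ (by simp [pureOf]; rw [fcV_eq a b c ha hb hc, if_neg h0, if_pos hbase])
          · simp only [if_neg h0, if_neg hbase]
            obtain ⟨haval, hamemo⟩ := (ih a b (c - 1) m ha hb (by omega) (by omega) hm).1
            obtain ⟨hbval, hbmemo⟩ := (ih a b (c - 1) (findaA f a b (c - 1) m).2 ha hb (by omega) (by omega) hamemo).2.1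
            have hval : PySem.Int.mod (c * (findaA f a b (c - 1) m).1 + c * (findbA f a b (c - 1) (findaA f a b (c - 1) m).2).1) pvMOD = fcV a b c := by
              rw [haval, hbval, fcV_eq a b c ha hb hc, if_neg h0, if_neg hbase]
            exact ⟨hval, GoodM_insert hbmemo _ _ (by simp [pureOf]; rw [← hval])⟩
      · simp only [findcA, hg]
        exact ⟨by have := hm _ _ hg; rw [this]; simp [pureOf], hm⟩

-- ===================== signature lemmas =====================

lemma cntA_cons (x : List Int) (l : List (List Int)) : cntA (x :: l) = cntA l + dA x := by
  unfold cntA dA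
  by_cases h : gcode x = 1 <;> simp [h, List.countP_cons]

lemma cntB_cons (x : List Int) (l : List (List Int)) : cntB (x :: l) = cntB l + dB x := by
  unfold cntB dB
  by_cases h : gcode x = 2 <;> simp [h, List.countP_cons]

lemma cntC_cons (x : List Int) (l : List (List Int)) : cntC (x :: l) = cntC l + dC x := by
  unfold cntC dC
  by_cases h1 : gcode x = 1 <;> by_cases h2 : gcode x = 2 <;>
    simp [h1, h2, List.countP_cons]

lemma dsum_cons (x : List Int) (l : List (List Int)) : dsum (x :: l) = dvalue x + dsum l := by
  simp [dsum]

lemma dABC_one (x : List Int) : dA x + dB x + dC x = 1 := by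
  unfold dA dB dC
  split_ifs <;> omega

lemma genreStep (s : List Int) (x y z : Int) :
    (let g := PySem.List.pyGetD s 1 0
     if g = 1 then ((x, y, z).1 + 1, (x, y, z).2.1, (x, y, z).2.2)
     else if g = 2 then ((x, y, z).1, (x, y, z).2.1 + 1, (x, y, z).2.2)
     else ((x, y, z).1, (x, y, z).2.1, (x, y, z).2.2 + 1)) = (x + dA s, y + dB s, z + dC s) := by
  by_cases h1 : PySem.List.pyGetD s 1 0 = 1 <;> by_cases h2 : PySem.List.pyGetD s 1 0 = 2 <;>
    simp_all [dA, dB, dC, gcode]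

lemma countGenres_go (l : List (List Int)) : ∀ x y z : Int,
    l.foldl (fun abc song =>
      let g := PySem.List.pyGetD song 1 0
      if g = 1 then (abc.1 + 1, abc.2.1, abc.2.2)
      else if g = 2 then (abc.1, abc.2.1 + 1, abc.2.2)
      else (abc.1, abc.2.1, abc.2.2 + 1)) (x, y, z)
    = (x + cntA l, y + cntB l, z + cntC l) := by
  induction l with
  | nil => intro x y z; simp [cntA, cntB, cntC]
  | cons s rest ih =>
    intro x y z
    rw [List.foldl_cons, genreStep, ih]
    rw [cntA_cons, cntB_cons, cntC_cons]
    simp only [Prod.mk.injEq]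
    refine ⟨by ring, by ring, by ring⟩

lemma countGenres_eq (l : List (List Int)) : countGenres l = (cntA l, cntB l, cntC l) := by
  unfold countGenres
  rw [countGenres_go]
  simp

lemma findsumA_eq (l : List (List Int)) : findsumA l = dsum l := by
  unfold findsumA
  suffices h : ∀ (l : List (List Int)) (s : Int),
      l.foldl (fun s song => s + PySem.List.pyGetD song 0 0) s = s + dsum l by
    rw [h]; ring
  intro l
  induction l with
  | nil => intro s; simp [dsum]
  | cons x xs ih =>
    intro s
    rw [List.foldl_cons, ih, dsum_cons]
    unfold dvalue
    ring

lemma cnt_nonneg (l : List (List Int)) : 0 ≤ cntA l ∧ 0 ≤ cntB l ∧ 0 ≤ cntC l := by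
  exact ⟨Int.natCast_nonneg _, Int.natCast_nonneg _, Int.natCast_nonneg _⟩

lemma cnt_len (l : List (List Int)) : cntA l + cntB l + cntC l = (l.length : Int) := by
  induction l with
  | nil => simp [cntA, cntB, cntC]
  | cons x xs ih =>
    rw [cntA_cons, cntB_cons, cntC_cons, List.length_cons]
    have := dABC_one x
    push_cast
    omega

lemma sigOf_nil : sigOf [] = (0, 0, 0, 0) := by simp [sigOf, cntA, cntB, cntC, dsum]

lemma sigOf_cons (x : List Int) (l : List (List Int)) : sigOf (x :: l) = shiftK x (sigOf l) := by
  simp [sigOf, shiftK, cntA_cons, cntB_cons, cntC_cons, dsum_cons, add_comm]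

lemma shift_comm (x y : List Int) (k : Int × Int × Int × Int) :
    shiftK y (shiftK x k) = shiftK x (shiftK y k) := by
  simp only [shiftK, Prod.mk.injEq]
  refine ⟨by ring, by ring, by ring, by ring⟩

-- ===================== NEsubs lemmas =====================

lemma NEsubs_ne_nil {sub : List (List Int)} : ∀ {l}, sub ∈ NEsubs l → sub ≠ [] := by
  intro l
  induction l with
  | nil => intro h; simp [NEsubs] at h
  | cons x xs ih =>
    intro h
    simp only [NEsubs, List.mem_append, List.mem_map, List.mem_singleton] at h
    rcases h with (h | ⟨s, _, rfl⟩) | rfl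
    · exact ih h
    · simp
    · simp

lemma NEsubs_sublist : ∀ {l sub : List (List Int)}, sub ∈ NEsubs l → sub.Sublist l := by
  intro l
  induction l with
  | nil => intro sub h; simp [NEsubs] at h
  | cons x xs ih =>
    intro sub h
    simp only [NEsubs, List.mem_append, List.mem_map, List.mem_singleton] at h
    rcases h with (h | ⟨s, hs, rfl⟩) | rfl
    · exact (ih h).cons x
    · exact (ih hs).cons₂ x
    · exact (List.nil_sublist xs).cons₂ x

lemma SN_congr {l : List (List Int)} {g1 g2 : List (List Int) → Int}
    (h : ∀ sub ∈ NEsubs l, g1 sub = g2 sub) : SN l g1 = SN l g2 := by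
  unfold SN
  exact congrArg List.sum (List.map_congr_left h)

lemma SN_zero {l : List (List Int)} {g : List (List Int) → Int}
    (h : ∀ sub ∈ NEsubs l, g sub = 0) : SN l g = 0 := by
  unfold SN
  apply List.sum_eq_zero
  intro y hy
  rcases List.mem_map.1 hy with ⟨sub, hs, rfl⟩
  exact h sub hs

lemma SN_add (l : List (List Int)) (g1 g2 : List (List Int) → Int) :
    SN l (fun s => g1 s + g2 s) = SN l g1 + SN l g2 := by
  unfold SN
  induction NEsubs l with
  | nil => simp
  | cons s rest ih => simp only [List.map_cons, List.sum_cons, ih]; ring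

lemma SN_cons (x : List Int) (xs : List (List Int)) (g : List (List Int) → Int) :
    SN (x :: xs) g = SN xs g + SN xs (fun s => g (x :: s)) + g [x] := by
  simp only [SN, NEsubs, List.map_append, List.sum_append, List.map_map, List.map_cons,
    List.map_nil, List.sum_cons, List.sum_nil, Function.comp_def]
  ring

-- ===================== A-side: combinations sum =====================

lemma combs_sum : ∀ (l : List (List Int)) (r : Nat) (F : List (List Int) → Int),
    ((combsA l (r + 1)).map F).sum = SN l (fun sub => if sub.length = r + 1 then F sub else 0) := by
  intro l
  induction l with
  | nil =>
    intro r F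
    have e : combsA [] (r + 1) = [] := by rw [combsA]
    simp [e, SN, NEsubs]
  | cons x xs ih =>
    intro r F
    have e : combsA (x :: xs) (r + 1) = ((combsA xs r).map (fun c => x :: c)) ++ combsA xs (r + 1) := by
      rw [combsA]
    rw [e, List.map_append, List.sum_append, List.map_map, SN_cons]
    simp only [Function.comp_def]
    cases r with
    | zero =>
      have e0 : combsA xs 0 = [[]] := by rw [combsA]
      rw [e0, ih 0 F]
      have hmid : SN xs (fun s => if (x :: s).length = 0 + 1 then F (x :: s) else 0) = 0 := by
        apply SN_zero
        intro sub hs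
        have hne := NEsubs_ne_nil hs
        have hlen : sub.length ≠ 0 := by
          cases sub
          · exact absurd rfl hne
          · simp
        rw [if_neg (by simp only [List.length_cons]; omega)]
      rw [hmid]
      simp only [List.map_cons, List.map_nil, List.sum_cons, List.sum_nil,
        List.length_cons, List.length_nil]
      rw [if_pos (by simp)]
      ring
    | succ r' =>
      rw [ih r' (fun c => F (x :: c)), ih (r' + 1) F]
      have h1 : SN xs (fun s => if (x :: s).length = r' + 1 + 1 then F (x :: s) else 0)
          = SN xs (fun s => if s.length = r' + 1 then F (x :: s) else 0) := by
        apply SN_congr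
        intro sub _
        apply if_congr _ rfl rfl
        simp only [List.length_cons]
        omega
      have h2 : (if [x].length = r' + 1 + 1 then F [x] else 0) = 0 := by
        rw [if_neg (by simp)]
      rw [h1, h2]
      ring

lemma foldA (T : Int) : ∀ (L : List (List (List Int))) (t : Int)
    (m : PySem.Dict (Int × Int × Int × String) Int) (X : Int), GoodM m → t = X % pvMOD →
    (L.foldl (combStep T) (t, m)).1 = (X + (L.map (Fv T)).sum) % pvMOD ∧
    GoodM (L.foldl (combStep T) (t, m)).2 := by
  intro L
  induction L with
  | nil =>
    intro t m X hm ht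
    simp only [List.foldl_nil, List.map_nil, List.sum_nil]
    exact ⟨by rw [ht, add_zero], hm⟩
  | cons comb L ih =>
    intro t m X hm ht
    rw [List.foldl_cons]
    by_cases hs : findsumA comb = T
    · have hds : dsum comb = T := by rw [← findsumA_eq]; exact hs
      have hfv : Fv T comb = faV (cntA comb) (cntB comb) (cntC comb)
          + fbV (cntA comb) (cntB comb) (cntC comb) + fcV (cntA comb) (cntB comb) (cntC comb) := by
        unfold Fv
        rw [if_pos hds]
      obtain ⟨hA0, hB0, hC0⟩ := cnt_nonneg comb
      have hP : combStep T (t, m) comb =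
          (PySem.Int.mod (t + ((findaA ((cntA comb + cntB comb + cntC comb).toNat + 1) (cntA comb) (cntB comb) (cntC comb) m).1
            + (findbA ((cntA comb + cntB comb + cntC comb).toNat + 1) (cntA comb) (cntB comb) (cntC comb) (findaA ((cntA comb + cntB comb + cntC comb).toNat + 1) (cntA comb) (cntB comb) (cntC comb) m).2).1
            + (findcA ((cntA comb + cntB comb + cntC comb).toNat + 1) (cntA comb) (cntB comb) (cntC comb) (findbA ((cntA comb + cntB comb + cntC comb).toNat + 1) (cntA comb) (cntB comb) (cntC comb) (findaA ((cntA comb + cntB comb + cntC comb).toNat + 1) (cntA comb) (cntB comb) (cntC comb) m).2).2).1)) pvMOD,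
           (findcA ((cntA comb + cntB comb + cntC comb).toNat + 1) (cntA comb) (cntB comb) (cntC comb) (findbA ((cntA comb + cntB comb + cntC comb).toNat + 1) (cntA comb) (cntB comb) (cntC comb) (findaA ((cntA comb + cntB comb + cntC comb).toNat + 1) (cntA comb) (cntB comb) (cntC comb) m).2).2).2) := by
        simp only [combStep, countGenres_eq, if_pos hs]
      have h1 := (memo_sound ((cntA comb + cntB comb + cntC comb).toNat + 1) (cntA comb) (cntB comb) (cntC comb) m hA0 hB0 hC0 (by omega) hm).1
      have h2 := (memo_sound ((cntA comb + cntB comb + cntC comb).toNat + 1) (cntA comb) (cntB comb) (cntC comb) _ hA0 hB0 hC0 (by omega) h1.2).2.1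
      have h3 := (memo_sound ((cntA comb + cntB comb + cntC comb).toNat + 1) (cntA comb) (cntB comb) (cntC comb) _ hA0 hB0 hC0 (by omega) h2.2).2.2
      have ht' : (combStep T (t, m) comb).1 = (X + Fv T comb) % pvMOD := by
        rw [hP]
        simp only [h1.1, h2.1, h3.1, pmod]
        rw [ht, Int.emod_add_emod, hfv]
      have hg' : GoodM (combStep T (t, m) comb).2 := by
        rw [hP]
        exact h3.2
      have hrec := ih (combStep T (t, m) comb).1 (combStep T (t, m) comb).2 (X + Fv T comb) hg' ht'
      rw [Prod.mk.eta] at hrec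
      refine ⟨?_, hrec.2⟩
      rw [hrec.1]
      congr 1
      simp only [List.map_cons, List.sum_cons]
      ring
    · have hP : combStep T (t, m) comb = (t, m) := by
        simp only [combStep, if_neg hs]
      have hfv : Fv T comb = 0 := by
        unfold Fv
        rw [if_neg (by rw [← findsumA_eq] at *; exact hs)]
      rw [hP]
      obtain ⟨hv, hg⟩ := ih t m X hm ht
      refine ⟨?_, hg⟩
      rw [hv]
      congr 1
      simp only [List.map_cons, List.sum_cons, hfv]
      ring

lemma outerA_eq (n T : Int) (songs : List (List Int)) : ∀ (fuel : Nat) (i t : Int)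
    (m : PySem.Dict (Int × Int × Int × String) Int) (X : Int),
    GoodM m → t = X % pvMOD → 1 ≤ i → fuel = (n + 1 - i).toNat →
    (outerA T songs fuel i (t, m)).1
      = (X + SN songs (fun sub => if i ≤ (sub.length : Int) ∧ (sub.length : Int) ≤ n then Fv T sub else 0)) % pvMOD := by
  intro fuel
  induction fuel with
  | zero =>
    intro i t m X hm ht h1 hf
    simp only [outerA]
    have hni : n < i := by omega
    rw [SN_zero (l := songs) (g := fun sub => if i ≤ (sub.length : Int) ∧ (sub.length : Int) ≤ n then Fv T sub else 0) ?_]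
    · simpa using ht
    · intro sub _
      dsimp only
      rw [if_neg]
      rintro ⟨hl1, hl2⟩
      omega
  | succ fuel ih =>
    intro i t m X hm ht h1 hf
    have hin : i ≤ n := by omega
    simp only [outerA]
    obtain ⟨r, hr⟩ : ∃ r : Nat, i.toNat = r + 1 := ⟨i.toNat - 1, by omega⟩
    obtain ⟨hfold1, hfold2⟩ := foldA T (combsA songs i.toNat) t m X hm ht
    have hsum : ((combsA songs i.toNat).map (Fv T)).sum
        = SN songs (fun sub => if sub.length = r + 1 then Fv T sub else 0) := by
      rw [hr]; exact combs_sum songs r (Fv T)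
    have hrec := ih (i + 1) ((combsA songs i.toNat).foldl (combStep T) (t, m)).1
      ((combsA songs i.toNat).foldl (combStep T) (t, m)).2
      (X + ((combsA songs i.toNat).map (Fv T)).sum) hfold2 hfold1 (by omega) (by omega)
    rw [Prod.mk.eta] at hrec
    rw [hrec]
    congr 1
    rw [hsum]
    have hsplit : SN songs (fun sub => if i ≤ (sub.length : Int) ∧ (sub.length : Int) ≤ n then Fv T sub else 0)
        = SN songs (fun sub => (if sub.length = r + 1 then Fv T sub else 0)
            + (if i + 1 ≤ (sub.length : Int) ∧ (sub.length : Int) ≤ n then Fv T sub else 0)) := by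
      apply SN_congr
      intro sub _
      dsimp only
      by_cases hc2 : sub.length = r + 1
      · have hlen : (sub.length : Int) = i := by omega
        rw [if_pos hc2]
        by_cases hc1 : i ≤ (sub.length : Int) ∧ (sub.length : Int) ≤ n
        · rw [if_pos hc1, if_neg (by rintro ⟨hx, _⟩; omega)]
          ring
        · exact absurd ⟨by omega, by omega⟩ hc1
      · rw [if_neg hc2]
        have hlen : (sub.length : Int) ≠ i := by omega
        by_cases hc3 : i + 1 ≤ (sub.length : Int) ∧ (sub.length : Int) ≤ n
        · rw [if_pos hc3, if_pos ⟨by omega, hc3.2⟩]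
          ring
        · rw [if_neg hc3, if_neg (fun hc1 => hc3 ⟨by omega, hc1.2⟩)]
          ring
    rw [hsplit, SN_add]
    ring

lemma core_logic_eq (n T : Int) (songs : List (List Int)) :
    core_logic n T songs
      = SN songs (fun sub => if 1 ≤ (sub.length : Int) ∧ (sub.length : Int) ≤ n then Fv T sub else 0) % pvMOD := by
  unfold core_logic
  have hge : GoodM PySem.Dict.empty := by
    intro k v h
    rw [PySem.Dict.get?_empty] at h
    cases h
  have h := outerA_eq n T songs n.toNat 1 0 PySem.Dict.empty 0 hge (by simp) le_rfl (by omega)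
  rw [pmod, h, Int.emod_emod_of_dvd _ dvd_rfl, zero_add]

-- ===================== B-side: dict sums =====================

lemma de_comp (x : List Int) :
    (if PySem.List.pyGetD x 1 0 = 1 then ((1 : Int), (0 : Int), (0 : Int))
     else if PySem.List.pyGetD x 1 0 = 2 then (0, 1, 0) else (0, 0, 1)) = (dA x, dB x, dC x) := by
  by_cases h1 : PySem.List.pyGetD x 1 0 = 1 <;> by_cases h2 : PySem.List.pyGetD x 1 0 = 2 <;>
    simp_all [dA, dB, dC, gcode]

lemma shiftK_zero (x : List Int) :
    shiftK x (0, 0, 0, 0) = (dA x, dB x, dC x, dvalue x) := by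
  simp [shiftK]

lemma sum_map_replace (g : Int × Int × Int × Int → Int) (k : Int × Int × Int × Int) (w : Int) :
    ∀ (lis : List ((Int × Int × Int × Int) × Int)) (v : Int), (lis.map Prod.fst).Nodup → (k, v) ∈ lis →
    ((lis.map (fun p => if p.1 == k then (k, w) else p)).map (fun kv => g kv.1 * kv.2)).sum
      = (lis.map (fun kv => g kv.1 * kv.2)).sum - g k * v + g k * w := by
  intro lis
  induction lis with
  | nil => intro v _ h; simp at h
  | cons p rest ih =>
    intro v hnd hmem
    rw [List.map_cons] at hnd
    have hnd1 : p.1 ∉ rest.map Prod.fst := (List.nodup_cons.1 hnd).1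
    have hnd2 : (rest.map Prod.fst).Nodup := (List.nodup_cons.1 hnd).2
    rcases List.mem_cons.1 hmem with heq | hmem'
    · have hp1 : p.1 = k := by rw [← heq]
      have hp2 : p.2 = v := by rw [← heq]
      have hrest : rest.map (fun q => if q.1 == k then (k, w) else q) = rest := by
        conv_rhs => rw [← List.map_id rest]
        apply List.map_congr_left
        intro q hq
        have hqk : q.1 ≠ k := by
          intro h
          exact hnd1 (by rw [hp1, ← h]; exact List.mem_map.2 ⟨q, hq, rfl⟩)
        simp [hqk, id]
      have hlist : (p :: rest).map (fun q => if q.1 == k then (k, w) else q) = (k, w) :: rest := by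
        rw [List.map_cons, hrest]
        congr 1
        simp [hp1]
      rw [hlist]
      simp only [List.map_cons, List.sum_cons]
      rw [hp1, hp2]
      ring
    · have hk : k ∈ rest.map Prod.fst := List.mem_map.2 ⟨(k, v), hmem', rfl⟩
      have hp1k : p.1 ≠ k := fun h => hnd1 (h ▸ hk)
      have hhead : (if p.1 == k then ((k, w) : (Int × Int × Int × Int) × Int) else p) = p := by
        simp [hp1k]
      rw [List.map_cons, hhead]
      simp only [List.map_cons, List.sum_cons]
      rw [ih v hnd2 hmem']
      ring

lemma SD_bump (g : Int × Int × Int × Int → Int) (d : PySem.Dict (Int × Int × Int × Int) Int)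
    (hnd : d.keys.Nodup) (k : Int × Int × Int × Int) (c : Int) :
    SD g (d.insert k (d.getD k 0 + c)) = SD g d + g k * c := by
  by_cases hc : d.contains k = true
  · have hk : k ∈ d.items.map Prod.fst := by
      have h := (PySem.Dict.contains_iff_mem_keys d k).1 hc
      simpa [PySem.Dict.keys] using h
    obtain ⟨p, hp, hpe⟩ := List.mem_map.1 hk
    have hpp : p = (k, p.2) := by
      rw [← hpe]
    have hv : (k, p.2) ∈ d.items := by
      rw [← hpp]
      exact hp
    have hndi : (d.items.map Prod.fst).Nodup := by
      simpa [PySem.Dict.keys] using hnd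
    have hgd : d.getD k 0 = p.2 := PySem.Dict.getD_of_mem_items d hv hnd 0
    unfold SD
    rw [PySem.Dict.items_insert_of_contains d _ hc]
    rw [sum_map_replace g k (d.getD k 0 + c) d.items p.2 hndi hv, hgd]
    ring
  · have hc' : d.contains k = false := by simpa using hc
    unfold SD
    rw [PySem.Dict.items_insert_of_not_contains d _ hc', PySem.Dict.getD_of_not_contains d 0 hc']
    rw [List.map_append, List.sum_append]
    simp

lemma SD_foldBump (g : Int × Int × Int × Int → Int) (e1 e2 e3 e4 : Int) :
    ∀ (L : List ((Int × Int × Int × Int) × Int)) (d : PySem.Dict (Int × Int × Int × Int) Int),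
    d.keys.Nodup →
    (SD g (L.foldl (fun d kv =>
        d.insert (kv.1.1 + e1, kv.1.2.1 + e2, kv.1.2.2.1 + e3, kv.1.2.2.2 + e4)
          (d.getD (kv.1.1 + e1, kv.1.2.1 + e2, kv.1.2.2.1 + e3, kv.1.2.2.2 + e4) 0 + kv.2)) d)
      = SD g d + (L.map (fun kv => g (kv.1.1 + e1, kv.1.2.1 + e2, kv.1.2.2.1 + e3, kv.1.2.2.2 + e4) * kv.2)).sum) ∧
    (L.foldl (fun d kv =>
        d.insert (kv.1.1 + e1, kv.1.2.1 + e2, kv.1.2.2.1 + e3, kv.1.2.2.2 + e4)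
          (d.getD (kv.1.1 + e1, kv.1.2.1 + e2, kv.1.2.2.1 + e3, kv.1.2.2.2 + e4) 0 + kv.2)) d).keys.Nodup := by
  intro L
  induction L with
  | nil => intro d hnd; exact ⟨by simp, hnd⟩
  | cons kv L ih =>
    intro d hnd
    rw [List.foldl_cons]
    obtain ⟨ihs, ihn⟩ := ih (d.insert (kv.1.1 + e1, kv.1.2.1 + e2, kv.1.2.2.1 + e3, kv.1.2.2.2 + e4)
        (d.getD (kv.1.1 + e1, kv.1.2.1 + e2, kv.1.2.2.1 + e3, kv.1.2.2.2 + e4) 0 + kv.2))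
      (PySem.Dict.nodup_keys_insert d _ _ hnd)
    refine ⟨?_, ihn⟩
    rw [ihs, SD_bump g d hnd _ kv.2]
    simp only [List.map_cons, List.sum_cons]
    ring

lemma SD_dpStep (g : Int × Int × Int × Int → Int) (x : List Int)
    (d : PySem.Dict (Int × Int × Int × Int) Int) (hnd : d.keys.Nodup) :
    SD g (dpStep d x) = SD g d + SD (fun k => g (shiftK x k)) d + g (shiftK x (0, 0, 0, 0)) := by
  unfold dpStep
  simp only [de_comp x]
  obtain ⟨hs1, hn1⟩ := SD_foldBump g (dA x) (dB x) (dC x) (PySem.List.pyGetD x 0 0) d.items d hnd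
  rw [SD_bump g _ hn1 _ 1, hs1]
  have hfun : SD (fun k => g (shiftK x k)) d
      = (d.items.map (fun kv => g (kv.1.1 + dA x, kv.1.2.1 + dB x, kv.1.2.2.1 + dC x, kv.1.2.2.2 + PySem.List.pyGetD x 0 0) * kv.2)).sum := rfl
  rw [hfun, shiftK_zero]
  have hdv : dvalue x = PySem.List.pyGetD x 0 0 := rfl
  rw [hdv]
  ring

lemma dpStep_nodup (x : List Int) (d : PySem.Dict (Int × Int × Int × Int) Int)
    (hnd : d.keys.Nodup) : (dpStep d x).keys.Nodup := by
  unfold dpStep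
  simp only [de_comp x]
  exact PySem.Dict.nodup_keys_insert _ _ _
    (SD_foldBump (fun _ => 0) (dA x) (dB x) (dC x) (PySem.List.pyGetD x 0 0) d.items d hnd).2

lemma Cc_dpStep (x : List Int) : ∀ (l : List (List Int)) (g : Int × Int × Int × Int → Int)
    (d : PySem.Dict (Int × Int × Int × Int) Int), d.keys.Nodup →
    Cc l g (dpStep d x) = Cc l g d + Cc l (fun k => g (shiftK x k)) d
      + SN l (fun sub => g (shiftK x (sigOf sub))) + g (shiftK x (0, 0, 0, 0)) := by
  intro l
  induction l with
  | nil =>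
    intro g d hnd
    simp only [Cc]
    rw [SD_dpStep g x d hnd]
    simp [SN, NEsubs]
  | cons y l ih =>
    intro g d hnd
    simp only [Cc]
    rw [ih g d hnd, ih (fun k => g (shiftK y k)) d hnd, SN_cons]
    try dsimp only
    have e1 : (fun k => g (shiftK y (shiftK x k))) = (fun k => g (shiftK x (shiftK y k))) :=
      funext fun k => congrArg g (shift_comm x y k)
    have e2 : (fun sub => g (shiftK y (shiftK x (sigOf sub)))) = (fun sub => g (shiftK x (sigOf (y :: sub)))) :=
      funext fun sub => by rw [shift_comm, sigOf_cons]
    have e3 : g (shiftK y (shiftK x (0, 0, 0, 0))) = g (shiftK x (sigOf [y])) := by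
      rw [shift_comm, sigOf_cons, sigOf_nil]
    rw [e1, e2, e3]
    ring

lemma mainB : ∀ (l : List (List Int)) (g : Int × Int × Int × Int → Int)
    (d : PySem.Dict (Int × Int × Int × Int) Int), d.keys.Nodup →
    SD g (l.foldl dpStep d) = Cc l g d + SN l (fun sub => g (sigOf sub)) := by
  intro l
  induction l with
  | nil => intro g d hnd; simp [Cc, SN, NEsubs]
  | cons x l ih =>
    intro g d hnd
    rw [List.foldl_cons]
    rw [ih g (dpStep d x) (dpStep_nodup x d hnd), Cc_dpStep x l g d hnd]
    simp only [Cc]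
    rw [SN_cons]
    try dsimp only
    have e2 : (fun s => g (sigOf (x :: s))) = (fun s => g (shiftK x (sigOf s))) :=
      funext fun s => by rw [sigOf_cons]
    have e3 : g (sigOf [x]) = g (shiftK x (0, 0, 0, 0)) := by
      rw [sigOf_cons, sigOf_nil]
    rw [e2, e3]
    ring

lemma Cc_empty : ∀ (l : List (List Int)) (g : Int × Int × Int × Int → Int),
    Cc l g PySem.Dict.empty = 0 := by
  intro l
  induction l with
  | nil => intro g; rfl
  | cons x l ih =>
    intro g
    simp only [Cc]
    rw [ih, ih]
    simp

-- ===================== B-side: arrangement table =====================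

lemma wCell_correct (w : PySem.Dict (Int × Int × Int) (Int × Int × Int)) (i j k : Int)
    (hi : 0 ≤ i) (hj : 0 ≤ j) (hk : 0 ≤ k)
    (h1 : 1 ≤ i → w.getD (i - 1, j, k) (0, 0, 0) = wV (i - 1) j k)
    (h2 : 1 ≤ j → w.getD (i, j - 1, k) (0, 0, 0) = wV i (j - 1) k)
    (h3 : 1 ≤ k → w.getD (i, j, k - 1) (0, 0, 0) = wV i j (k - 1)) :
    wCell w i j k = wV i j k := by
  unfold wCell
  dsimp only
  have hfa : (if i = 0 then 0
      else if i = 1 ∧ j = 0 ∧ k = 0 then 1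
      else PySem.Int.mod (i * ((w.getD (i - 1, j, k) (0, 0, 0)).2.1 + (w.getD (i - 1, j, k) (0, 0, 0)).2.2)) pvMOD) = faV i j k := by
    rw [faV_eq i j k hi hj hk]
    by_cases h0 : i = 0
    · simp [h0]
    · by_cases hbase : i = 1 ∧ j = 0 ∧ k = 0
      · simp [h0, hbase]
      · rw [if_neg h0, if_neg hbase, if_neg h0, if_neg hbase, h1 (by omega)]
        unfold wV
        dsimp only
        congr 1
        ring
  have hfb : (if j = 0 then 0
      else if j = 1 ∧ i = 0 ∧ k = 0 then 1
      else PySem.Int.mod (j * ((w.getD (i, j - 1, k) (0, 0, 0)).1 + (w.getD (i, j - 1, k) (0, 0, 0)).2.2)) pvMOD) = fbV i j k := by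
    rw [fbV_eq i j k hi hj hk]
    by_cases h0 : j = 0
    · simp [h0]
    · by_cases hbase : j = 1 ∧ i = 0 ∧ k = 0
      · simp [h0, hbase]
      · rw [if_neg h0, if_neg hbase, if_neg h0, if_neg hbase, h2 (by omega)]
        unfold wV
        dsimp only
        congr 1
        ring
  have hfc : (if k = 0 then 0
      else if k = 1 ∧ i = 0 ∧ j = 0 then 1
      else PySem.Int.mod (k * ((w.getD (i, j, k - 1) (0, 0, 0)).1 + (w.getD (i, j, k - 1) (0, 0, 0)).2.1)) pvMOD) = fcV i j k := by
    rw [fcV_eq i j k hi hj hk]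
    by_cases h0 : k = 0
    · simp [h0]
    · by_cases hbase : k = 1 ∧ i = 0 ∧ j = 0
      · simp [h0, hbase]
      · rw [if_neg h0, if_neg hbase, if_neg h0, if_neg hbase, h3 (by omega)]
        unfold wV
        dsimp only
        congr 1
        ring
  rw [hfa, hfb, hfc]
  rfl


lemma rowK (i j gc : Int) (hi : 0 ≤ i) (hj : 0 ≤ j) :
    ∀ (fl : Nat) (k0 : Int) (w : PySem.Dict (Int × Int × Int) (Int × Int × Int)),
    fl = (gc + 1 - k0).toNat → 0 ≤ k0 →
    (∀ k', 0 ≤ k' → k' ≤ gc → 1 ≤ i → w.getD (i - 1, j, k') (0, 0, 0) = wV (i - 1) j k') →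
    (∀ k', 0 ≤ k' → k' ≤ gc → 1 ≤ j → w.getD (i, j - 1, k') (0, 0, 0) = wV i (j - 1) k') →
    (∀ k', 0 ≤ k' → k' < k0 → w.getD (i, j, k') (0, 0, 0) = wV i j k') →
    (∀ k', 0 ≤ k' → k' ≤ gc →
      ((PySem.List.pyRange k0 (gc + 1) 1).foldl (fun w k => w.insert (i, j, k) (wCell w i j k)) w).getD (i, j, k') (0, 0, 0) = wV i j k') ∧
    (∀ p : Int × Int × Int, ¬(p.1 = i ∧ p.2.1 = j ∧ k0 ≤ p.2.2) →
      ((PySem.List.pyRange k0 (gc + 1) 1).foldl (fun w k => w.insert (i, j, k) (wCell w i j k)) w).getD p (0, 0, 0) = w.getD p (0, 0, 0)) := by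
  intro fl
  induction fl with
  | zero =>
    intro k0 w hfl hk0 H1 H2 H3
    rw [PySem.List.pyRange_one_eq_nil (by omega : gc + 1 ≤ k0)]
    simp only [List.foldl_nil]
    constructor
    · intro k' h0 hgc'
      exact H3 k' h0 (by omega)
    · intro p _
      trivial
  | succ fl ih =>
    intro k0 w hfl hk0 H1 H2 H3
    have hlt : k0 < gc + 1 := by omega
    rw [PySem.List.pyRange_one_cons hlt, List.foldl_cons]
    have hcell : wCell w i j k0 = wV i j k0 :=
      wCell_correct w i j k0 hi hj hk0
        (fun h => H1 k0 hk0 (by omega) h)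
        (fun h => H2 k0 hk0 (by omega) h)
        (fun h => H3 (k0 - 1) (by omega) (by omega))
    have hget1 : ∀ k', (w.insert (i, j, k0) (wCell w i j k0)).getD (i - 1, j, k') (0, 0, 0) = w.getD (i - 1, j, k') (0, 0, 0) := by
      intro k'
      apply PySem.Dict.getD_insert_of_ne
      simp only [ne_eq, Prod.mk.injEq]
      omega
    have hget2 : ∀ k', (w.insert (i, j, k0) (wCell w i j k0)).getD (i, j - 1, k') (0, 0, 0) = w.getD (i, j - 1, k') (0, 0, 0) := by
      intro k'
      apply PySem.Dict.getD_insert_of_ne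
      simp only [ne_eq, Prod.mk.injEq]
      omega
    have hget3 : ∀ k', k' ≠ k0 → (w.insert (i, j, k0) (wCell w i j k0)).getD (i, j, k') (0, 0, 0) = w.getD (i, j, k') (0, 0, 0) := by
      intro k' hne
      apply PySem.Dict.getD_insert_of_ne
      simp only [ne_eq, Prod.mk.injEq]
      omega
    have hself : (w.insert (i, j, k0) (wCell w i j k0)).getD (i, j, k0) (0, 0, 0) = wV i j k0 := by
      rw [PySem.Dict.getD_insert_self, hcell]
    obtain ⟨C1, C2⟩ := ih (k0 + 1) (w.insert (i, j, k0) (wCell w i j k0)) (by omega) (by omega)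
      (fun k' h0 hgc' hi1 => by rw [hget1]; exact H1 k' h0 hgc' hi1)
      (fun k' h0 hgc' hj1 => by rw [hget2]; exact H2 k' h0 hgc' hj1)
      (fun k' h0 hlt' => by
        rcases eq_or_ne k' k0 with rfl | hne
        · exact hself
        · rw [hget3 k' hne]; exact H3 k' h0 (by omega))
    refine ⟨C1, ?_⟩
    intro p hp
    rw [C2 p (by rintro ⟨hp1, hp2, hp3⟩; exact hp ⟨hp1, hp2, by omega⟩)]
    apply PySem.Dict.getD_insert_of_ne
    rcases p with ⟨p1, p2, p3⟩
    simp only [ne_eq, Prod.mk.injEq]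
    simp only [not_and] at hp ⊢
    omega


lemma rowJ (i gb gc : Int) (hi : 0 ≤ i) (hgc : 0 ≤ gc) :
    ∀ (fl : Nat) (j0 : Int) (w : PySem.Dict (Int × Int × Int) (Int × Int × Int)),
    fl = (gb + 1 - j0).toNat → 0 ≤ j0 →
    (∀ j' k', 0 ≤ j' → j' ≤ gb → 0 ≤ k' → k' ≤ gc → 1 ≤ i → w.getD (i - 1, j', k') (0, 0, 0) = wV (i - 1) j' k') →
    (∀ j' k', 0 ≤ j' → j' < j0 → 0 ≤ k' → k' ≤ gc → w.getD (i, j', k') (0, 0, 0) = wV i j' k') →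
    (∀ j' k', 0 ≤ j' → j' ≤ gb → 0 ≤ k' → k' ≤ gc →
      ((PySem.List.pyRange j0 (gb + 1) 1).foldl (fun w j =>
        (PySem.List.pyRange 0 (gc + 1) 1).foldl (fun w k => w.insert (i, j, k) (wCell w i j k)) w) w).getD (i, j', k') (0, 0, 0) = wV i j' k') ∧
    (∀ p : Int × Int × Int, ¬(p.1 = i ∧ j0 ≤ p.2.1) →
      ((PySem.List.pyRange j0 (gb + 1) 1).foldl (fun w j =>
        (PySem.List.pyRange 0 (gc + 1) 1).foldl (fun w k => w.insert (i, j, k) (wCell w i j k)) w) w).getD p (0, 0, 0) = w.getD p (0, 0, 0)) := by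
  intro fl
  induction fl with
  | zero =>
    intro j0 w hfl hj0 H1 H3
    rw [PySem.List.pyRange_one_eq_nil (by omega : gb + 1 ≤ j0)]
    simp only [List.foldl_nil]
    constructor
    · intro j' k' h0 hgb' h0k hgc'
      exact H3 j' k' h0 (by omega) h0k hgc'
    · intro p _
      trivial
  | succ fl ih =>
    intro j0 w hfl hj0 H1 H3
    have hlt : j0 < gb + 1 := by omega
    rw [PySem.List.pyRange_one_cons hlt, List.foldl_cons]
    obtain ⟨K1, K2⟩ := rowK i j0 gc hi hj0 ((gc + 1 - 0).toNat) 0 w rfl le_rfl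
      (fun k' h0 hgc' hi1 => H1 j0 k' hj0 (by omega) h0 hgc' hi1)
      (fun k' h0 hgc' hj1 => H3 (j0 - 1) k' (by omega) (by omega) h0 hgc')
      (fun k' h0 hlt' => absurd hlt' (by omega))
    obtain ⟨C1, C2⟩ := ih (j0 + 1)
      ((PySem.List.pyRange 0 (gc + 1) 1).foldl (fun w k => w.insert (i, j0, k) (wCell w i j0 k)) w)
      (by omega) (by omega)
      (fun j' k' h0 hgb' h0k hgc' hi1 => by
        rw [K2 (i - 1, j', k') (by rintro ⟨h, _⟩; omega)]
        exact H1 j' k' h0 hgb' h0k hgc' hi1)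
      (fun j' k' h0 hlt' h0k hgc' => by
        rcases eq_or_ne j' j0 with rfl | hne
        · exact K1 k' h0k hgc'
        · rw [K2 (i, j', k') (by rintro ⟨_, h, _⟩; exact hne h)]
          exact H3 j' k' h0 (by omega) h0k hgc')
    refine ⟨C1, ?_⟩
    intro p hp
    rw [C2 p (by rintro ⟨hp1, hp2⟩; exact hp ⟨hp1, by omega⟩)]
    exact K2 p (by rintro ⟨hp1, hp2, _⟩; exact hp ⟨hp1, by omega⟩)


lemma buildW_correct (ga gb gc : Int) (hga : 0 ≤ ga) (hgb : 0 ≤ gb) (hgc : 0 ≤ gc) :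
    ∀ a b c : Int, 0 ≤ a → a ≤ ga → 0 ≤ b → b ≤ gb → 0 ≤ c → c ≤ gc →
    (buildW ga gb gc).getD (a, b, c) (0, 0, 0) = wV a b c := by
  suffices h : ∀ (fl : Nat) (i0 : Int) (w : PySem.Dict (Int × Int × Int) (Int × Int × Int)),
      fl = (ga + 1 - i0).toNat → 0 ≤ i0 →
      (∀ i' j' k', 0 ≤ i' → i' < i0 → 0 ≤ j' → j' ≤ gb → 0 ≤ k' → k' ≤ gc →
        w.getD (i', j', k') (0, 0, 0) = wV i' j' k') →
      (∀ i' j' k', 0 ≤ i' → i' ≤ ga → 0 ≤ j' → j' ≤ gb → 0 ≤ k' → k' ≤ gc →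
        ((PySem.List.pyRange i0 (ga + 1) 1).foldl (fun w i =>
          (PySem.List.pyRange 0 (gb + 1) 1).foldl (fun w j =>
            (PySem.List.pyRange 0 (gc + 1) 1).foldl (fun w k => w.insert (i, j, k) (wCell w i j k)) w) w) w).getD (i', j', k') (0, 0, 0) = wV i' j' k') by
    intro a b c h0a hag h0b hbg h0c hcg
    exact h ((ga + 1 - 0).toNat) 0 PySem.Dict.empty rfl le_rfl
      (fun i' j' k' _ hlt _ _ _ _ => absurd hlt (by omega)) a b c h0a hag h0b hbg h0c hcg
  intro fl
  induction fl with
  | zero =>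
    intro i0 w hfl h0 Hprev
    rw [PySem.List.pyRange_one_eq_nil (by omega : ga + 1 ≤ i0)]
    simp only [List.foldl_nil]
    exact fun i' j' k' h0i hig h0j hjg h0k hkg => Hprev i' j' k' h0i (by omega) h0j hjg h0k hkg
  | succ fl ih =>
    intro i0 w hfl h0 Hprev
    have hlt : i0 < ga + 1 := by omega
    rw [PySem.List.pyRange_one_cons hlt, List.foldl_cons]
    obtain ⟨J1, J2⟩ := rowJ i0 gb gc h0 hgc ((gb + 1 - 0).toNat) 0 w rfl le_rfl
      (fun j' k' h0j hjg h0k hkg hi1 => Hprev (i0 - 1) j' k' (by omega) (by omega) h0j hjg h0k hkg)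
      (fun j' k' _ hlt' _ _ => absurd hlt' (by omega))
    exact ih (i0 + 1) _ (by omega) (by omega)
      (fun i' j' k' h0i hlt' h0j hjg h0k hkg => by
        rcases eq_or_ne i' i0 with rfl | hne
        · exact J1 j' k' h0j hjg h0k hkg
        · rw [J2 (i', j', k') (by rintro ⟨h, _⟩; exact hne h)]
          exact Hprev i' j' k' h0i (by omega) h0j hjg h0k hkg)


-- ===================== B-side: final fold and assembly =====================

def gBW (n T : Int) (w : PySem.Dict (Int × Int × Int) (Int × Int × Int))
    (k : Int × Int × Int × Int) : Int :=
  if k.2.2.2 = T ∧ 1 ≤ k.1 + k.2.1 + k.2.2.1 ∧ k.1 + k.2.1 + k.2.2.1 ≤ n then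
    (w.getD (k.1, k.2.1, k.2.2.1) (0, 0, 0)).1 + (w.getD (k.1, k.2.1, k.2.2.1) (0, 0, 0)).2.1
      + (w.getD (k.1, k.2.1, k.2.2.1) (0, 0, 0)).2.2
  else 0

lemma foldB_go (n T : Int) (w : PySem.Dict (Int × Int × Int) (Int × Int × Int)) :
    ∀ (L : List ((Int × Int × Int × Int) × Int)) (t X : Int), t = X % pvMOD →
    L.foldl (fun t kv =>
      if kv.1.2.2.2 = T ∧ 1 ≤ kv.1.1 + kv.1.2.1 + kv.1.2.2.1 ∧ kv.1.1 + kv.1.2.1 + kv.1.2.2.1 ≤ n then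
        let p := w.getD (kv.1.1, kv.1.2.1, kv.1.2.2.1) (0, 0, 0)
        PySem.Int.mod (t + kv.2 * (p.1 + p.2.1 + p.2.2)) pvMOD
      else t) t
    = (X + (L.map (fun kv => gBW n T w kv.1 * kv.2)).sum) % pvMOD := by
  intro L
  induction L with
  | nil => intro t X ht; simpa using ht
  | cons kv L ih =>
    intro t X ht
    rw [List.foldl_cons]
    by_cases hc : kv.1.2.2.2 = T ∧ 1 ≤ kv.1.1 + kv.1.2.1 + kv.1.2.2.1 ∧ kv.1.1 + kv.1.2.1 + kv.1.2.2.1 ≤ n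
    · rw [ih _ (X + gBW n T w kv.1 * kv.2) ?_]
      · congr 1
        simp only [List.map_cons, List.sum_cons]
        ring
      · simp only [if_pos hc]
        unfold gBW
        rw [if_pos hc, pmod, ht, Int.emod_add_emod]
        congr 1
        ring
    · rw [ih _ X ?_]
      · congr 1
        simp only [List.map_cons, List.sum_cons]
        unfold gBW
        rw [if_neg hc]
        ring
      · simp only [if_neg hc, ht]

lemma totFold_eq (n T : Int) (w : PySem.Dict (Int × Int × Int) (Int × Int × Int))
    (dp : PySem.Dict (Int × Int × Int × Int) Int) :
    totFold n T w dp = ((dp.items.map (fun kv => gBW n T w kv.1 * kv.2)).sum) % pvMOD := by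
  unfold totFold
  rw [foldB_go n T w dp.items 0 0 (by simp), zero_add]

lemma core_logic_alt_eq (n T : Int) (songs : List (List Int)) :
    core_logic_alt n T songs
      = SN songs (fun sub => gBW n T (buildW (cntA songs) (cntB songs) (cntC songs)) (sigOf sub)) % pvMOD := by
  unfold core_logic_alt
  show PySem.Int.mod (totFold n T
      (buildW ((songs.countP (fun s => PySem.List.pyGetD s 1 0 == 1) : Nat))
        ((songs.countP (fun s => PySem.List.pyGetD s 1 0 == 2) : Nat))
        ((songs.length : Int) - ((songs.countP (fun s => PySem.List.pyGetD s 1 0 == 1) : Nat))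
          - ((songs.countP (fun s => PySem.List.pyGetD s 1 0 == 2) : Nat))))
      (songs.foldl dpStep PySem.Dict.empty)) pvMOD = _
  have e1 : (((songs.countP (fun s => PySem.List.pyGetD s 1 0 == 1) : Nat)) : Int) = cntA songs := rfl
  have e2 : (((songs.countP (fun s => PySem.List.pyGetD s 1 0 == 2) : Nat)) : Int) = cntB songs := rfl
  rw [e1, e2]
  have e3 : (songs.length : Int) - cntA songs - cntB songs = cntC songs := by
    have := cnt_len songs
    omega
  rw [e3, totFold_eq]
  have e4 : ((songs.foldl dpStep PySem.Dict.empty).items.map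
      (fun kv => gBW n T (buildW (cntA songs) (cntB songs) (cntC songs)) kv.1 * kv.2)).sum
      = SD (gBW n T (buildW (cntA songs) (cntB songs) (cntC songs))) (songs.foldl dpStep PySem.Dict.empty) := rfl
  rw [e4, mainB songs _ PySem.Dict.empty PySem.Dict.nodup_keys_empty, Cc_empty, zero_add]
  rw [pmod, Int.emod_emod_of_dvd _ dvd_rfl]

-- ===== VERDICT (by name: the statement is the Claim_ definition above) =====
theorem core_logic_spec : Claim_equal_core_logic := by
  intro n T songs hD hP
  show core_logic n T songs = core_logic_alt n T songs
  rw [core_logic_eq, core_logic_alt_eq]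
  congr 1
  apply SN_congr
  intro sub hmem
  try dsimp only
  have hsl : sub.Sublist songs := NEsubs_sublist hmem
  obtain ⟨hA0, hB0, hC0⟩ := cnt_nonneg sub
  have hlen_sub := cnt_len sub
  have hba : cntA sub ≤ cntA songs := by
    unfold cntA
    exact_mod_cast hsl.countP_le
  have hbb : cntB sub ≤ cntB songs := by
    unfold cntB
    exact_mod_cast hsl.countP_le
  have hbc : cntC sub ≤ cntC songs := by
    unfold cntC
    exact_mod_cast hsl.countP_le
  obtain ⟨hA0s, hB0s, hC0s⟩ := cnt_nonneg songs
  unfold gBW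
  simp only [sigOf]
  by_cases hT : dsum sub = T
  · by_cases hsz : 1 ≤ (sub.length : Int) ∧ (sub.length : Int) ≤ n
    · rw [if_pos hsz, if_pos ⟨hT, by omega, by omega⟩]
      unfold Fv
      rw [if_pos hT,
        buildW_correct (cntA songs) (cntB songs) (cntC songs) hA0s hB0s hC0s
          (cntA sub) (cntB sub) (cntC sub) hA0 hba hB0 hbb hC0 hbc]
      rfl
    · rw [if_neg hsz, if_neg (by rintro ⟨_, hx1, hx2⟩; exact hsz ⟨by omega, by omega⟩)]
  · by_cases hsz : 1 ≤ (sub.length : Int) ∧ (sub.length : Int) ≤ n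
    · rw [if_pos hsz, if_neg (by rintro ⟨hx, _⟩; exact hT hx)]
      unfold Fv
      rw [if_neg hT]
    · rw [if_neg hsz, if_neg (by rintro ⟨_, hx1, hx2⟩; exact hsz ⟨by omega, by omega⟩)]
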